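-- pv_equiv track=rewrite | github.com/sequentech/iam | iam/authmethods/utils.py | normalize_dni
-- ===== SOURCE A (Python) =====
-- DNI_ALLOWED_CHARS = "1234567890QWERTYUIOPASDFGHJKLZXCVBNM"
--
-- def normalize_dni(dni):
--     '''
--     Normalizes dnis, using uppercase, removing characters not allowed and
--     left-side zeros
--     '''
--     dni2 = ''.join([i for i in dni.upper() if i in DNI_ALLOWED_CHARS])
--     last_char = ""
--     dni3 = ""
--     for c in dni2:
--       if (last_char == "" or last_char not in '1234567890XY') and c == '0':
--         continue
--       dni3 += c
--       last_char = c
--     return dni3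
-- ===== SOURCE B (Python) =====
-- import re
--
-- DNI_ALLOWED_CHARS = "1234567890QWERTYUIOPASDFGHJKLZXCVBNM"
--
-- def normalize_dni(dni):
--     '''
--     Normalizes dnis, using uppercase, removing characters not allowed and
--     left-side zeros
--     '''
--     dni2 = ''.join(c for c in dni.upper() if c in DNI_ALLOWED_CHARS)
--     # drop every maximal zero-run that starts the string or follows a char
--     # outside [0-9XY] (only zeros are ever dropped, so this is the
--     # "last kept char" rule)
--     return re.sub(r'(^|[^0-9XY])0+', r'\1', dni2)
-- ===== Notes on version B (the rewrite author's own statement) =====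
-- stated objective: idiomatic
-- what changed: The stateful last-kept-char loop is replaced by a single regex substitution that deletes every maximal zero-run standing at the start of the string or right after a character outside the digits/X/Y class.
import Mathlib
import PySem

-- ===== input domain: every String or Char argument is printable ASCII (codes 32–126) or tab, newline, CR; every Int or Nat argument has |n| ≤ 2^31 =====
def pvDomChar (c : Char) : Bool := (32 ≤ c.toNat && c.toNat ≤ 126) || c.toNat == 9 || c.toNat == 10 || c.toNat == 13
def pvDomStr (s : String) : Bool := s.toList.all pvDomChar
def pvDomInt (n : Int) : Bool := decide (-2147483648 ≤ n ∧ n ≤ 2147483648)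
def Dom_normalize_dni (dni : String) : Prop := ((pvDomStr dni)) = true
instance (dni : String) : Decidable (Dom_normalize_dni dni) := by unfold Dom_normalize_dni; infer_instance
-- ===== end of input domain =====

-- B replaces A's stateful last-kept-char loop by a single regex substitution
-- deleting zero-runs at the start or after a non-[0-9XY] char (idiomatic; same cost).

-- ===== PORT A =====
def pvAllowed : List Char := "1234567890QWERTYUIOPASDFGHJKLZXCVBNM".toList
def pvClass : List Char := "1234567890XY".toList

-- one iteration of A's for-loop; state = (last_char, dni3) as char lists
-- ('x in str' for the single-char string last_char is PySem.Chars.isIn; for the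
-- single char i it is exactly list membership in the allowed chars)
def pvStepA (st : List Char × List Char) (c : Char) : List Char × List Char :=
  if (st.1.isEmpty || !(PySem.Chars.isIn st.1 pvClass)) && (c == '0') then st
  else ([c], st.2 ++ [c])

def normalize_dni (dni : String) : String :=
  let dni2 := (PySem.Str.upper dni).toList.filter (fun i => pvAllowed.contains i)
  String.ofList (dni2.foldl pvStepA ([], [])).2

-- ===== PORT B =====
-- hand port of Source B's re.sub(r'(^|[^0-9XY])0+', r'\1', dni2): exact for this
-- pattern — after each kept char outside [0-9XY] the following run of zeros is
-- deleted (and the '^' alternative deletes a leading zero-run, done at the call site)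
def pvSubZeros : List Char → List Char
  | [] => []
  | c :: rest =>
      if pvClass.contains c then c :: pvSubZeros rest
      else c :: pvSubZeros (rest.dropWhile (· == '0'))
termination_by l => l.length
decreasing_by
  all_goals
    have := List.length_dropWhile_le (fun x => x == '0') rest
    simp_all

def normalize_dni_alt (dni : String) : String :=
  let dni2 := (PySem.Str.upper dni).toList.filter (fun c => pvAllowed.contains c)
  String.ofList (pvSubZeros (dni2.dropWhile (· == '0')))

-- ===== PRECONDITION & SPEC =====
def Spec_normalize_dni (dni : String) (out : String) : Prop := out = normalize_dni_alt dni
instance (dni : String) (out : String) : Decidable (Spec_normalize_dni dni out) := by unfold Spec_normalize_dni; infer_instance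

-- ===== CLAIM (what is proved, stated in full; the proofs are below) =====
def Claim_equal_normalize_dni : Prop := ∀ (dni : String), Dom_normalize_dni dni → Spec_normalize_dni dni (normalize_dni dni)

-- ===== LEMMAS AND PROOFS =====

-- "zero-keeping mode" of A's state: last_char nonempty and a substring of '1234567890XY'
def pvKm (last : List Char) : Bool := !last.isEmpty && PySem.Chars.isIn last pvClass

lemma pv_isIn_singleton (c : Char) (s : List Char) :
    PySem.Chars.isIn [c] s = s.contains c := by
  rcases h : PySem.Chars.isIn [c] s with _ | _
  · have := (PySem.Chars.isIn_eq_false_iff _ _).mp h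
    rw [List.singleton_infix_iff] at this
    simp [this]
  · have := (PySem.Chars.isIn_iff_infix _ _).mp h
    rw [List.singleton_infix_iff] at this
    simp [this]

lemma pv_foldl_stepA (l last acc) :
    (l.foldl pvStepA (last, acc)).2 =
      acc ++ (if pvKm last then pvSubZeros l else pvSubZeros (l.dropWhile (· == '0'))) := by
  induction l generalizing last acc with
  | nil => simp [pvSubZeros]
  | cons c t ih =>
    rw [List.foldl_cons]
    by_cases h0 : c = '0'
    · subst h0
      by_cases hk : pvKm last
      · have hstep : pvStepA (last, acc) '0' = (['0'], acc ++ ['0']) := by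
          unfold pvKm at hk; simp_all [pvStepA]
        rw [hstep, ih]
        have hkm1 : pvKm ['0'] = true := by decide
        simp [hk, hkm1, pvSubZeros]
        intro hx
        exact absurd (by decide : '0' ∈ pvClass) hx
      · have hcond : (last.isEmpty || !PySem.Chars.isIn last pvClass) = true := by
          unfold pvKm at hk; by_cases hl : last = [] <;> simp_all
        have hstep : pvStepA (last, acc) '0' = (last, acc) := by
          simp [pvStepA, hcond]
        rw [hstep, ih]
        simp [hk, List.dropWhile]
    · have hstep : pvStepA (last, acc) c = ([c], acc ++ [c]) := by
        simp [pvStepA, h0]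
      rw [hstep, ih]
      have hkm1 : pvKm [c] = pvClass.contains c := by
        unfold pvKm; simp [pv_isIn_singleton]
      have hce : (c == '0') = false := by simp [h0]
      by_cases hcc : pvClass.contains c = true
      · simp [hkm1, pvSubZeros, List.dropWhile, hce]
        split <;> simp
      · simp [hkm1, pvSubZeros, List.dropWhile, hce]
        split <;> simp

-- ===== VERDICT (by name: the statement is the Claim_ definition above) =====
theorem normalize_dni_spec : Claim_equal_normalize_dni := by
  intro dni _
  unfold Spec_normalize_dni normalize_dni normalize_dni_alt
  simp only [pv_foldl_stepA]
  rfl
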